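-- pv_equiv track=rewrite | github.com/20192021855-DCAN/HOMEWORK-5 | 2017302580109/checksum_simulator.py | transform_integer_into_bit_list
-- ===== SOURCE A (Python) =====
-- def transform_integer_into_bit_list(integer):
-- 	cpl_code = integer
-- 	if(integer < 0):
-- 		cpl_code = cpl_code & 0xffff
-- 	bit_list = list(bin(cpl_code).replace("0b", ""))
-- 	if len(bit_list) < 16:
-- 		for i in range(0, 16 - len(bit_list)):
-- 			bit_list.insert(0, '0') #补全高位的0
-- 	return bit_list
-- ===== SOURCE B (Python) =====
-- def transform_integer_into_bit_list(integer):
--     v = integer & 0xffff if integer < 0 else integer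
--     bits = []
--     if v == 0:
--         bits = ['0']
--     while v > 0:
--         bits.append(str(v & 1))
--         v >>= 1
--     bits.reverse()
--     while len(bits) < 16:
--         bits.insert(0, '0')
--     return bits
-- ===== Notes on version B (the rewrite author's own statement) =====
-- stated objective: alternative
-- what changed: Replaces bin()/replace string formatting plus an insert-padding for-loop with arithmetic bit extraction (while v>0 collect v&1, shift, reverse) and a while-loop prepending zeros up to length 16.
import Mathlib
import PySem

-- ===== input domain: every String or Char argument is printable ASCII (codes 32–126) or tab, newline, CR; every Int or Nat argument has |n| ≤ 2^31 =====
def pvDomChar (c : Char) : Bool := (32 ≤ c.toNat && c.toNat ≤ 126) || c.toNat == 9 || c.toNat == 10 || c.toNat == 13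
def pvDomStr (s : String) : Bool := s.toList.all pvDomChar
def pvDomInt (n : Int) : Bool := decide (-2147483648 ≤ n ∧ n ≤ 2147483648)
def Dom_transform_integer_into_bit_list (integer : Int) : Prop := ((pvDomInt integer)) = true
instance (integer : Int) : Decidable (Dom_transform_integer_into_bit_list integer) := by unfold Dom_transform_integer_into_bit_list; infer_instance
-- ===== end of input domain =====

-- B replaces A's bin()/replace string formatting and insert-padding for-loop with
-- arithmetic bit extraction (collect v&1 while shifting, then reverse) and replicate-padding;
-- same cost, different decomposition ("alternative").

-- ===== PORT A =====
-- bin(n) for n ≥ 0, without the "0b" prefix, as a list of one-char digit strings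
-- (msb-first recursion; exact for the nonnegative values A feeds it).
def pvBinDigitsA (n : Nat) : List String :=
  if n < 2 then [PySem.Int.toStr (n : Int)]
  else pvBinDigitsA (n / 2) ++ [PySem.Int.toStr ((n % 2 : Nat) : Int)]

def transform_integer_into_bit_list (integer : Int) : List String :=
  -- cpl_code = integer; if integer < 0: cpl_code &= 0xffff  (so cpl_code ≥ 0; .toNat is exact)
  let cpl_code : Int := if integer < 0 then PySem.Int.band integer 0xffff else integer
  let bit_list := pvBinDigitsA cpl_code.toNat
  if bit_list.length < 16 then
    List.foldl (fun acc _ => PySem.List.insert acc 0 "0") bit_list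
      (PySem.List.pyRange 0 ((16 : Int) - bit_list.length) 1)
  else bit_list

-- ===== PORT B =====
-- while v > 0: bits.append(str(v & 1)); v >>= 1   (lsb-first; v ≥ 0 in B, so Nat recursion is exact)
def pvBitsLsbB (v : Nat) : List String :=
  if v = 0 then [] else PySem.Int.toStr ((v &&& 1 : Nat) : Int) :: pvBitsLsbB (v / 2)

def transform_integer_into_bit_list_alt (integer : Int) : List String :=
  let v : Int := if integer < 0 then PySem.Int.band integer 0xffff else integer
  let bits := if v = 0 then ["0"] else (pvBitsLsbB v.toNat).reverse
  List.replicate (16 - bits.length) "0" ++ bits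

-- ===== PRECONDITION & SPEC =====
def Spec_transform_integer_into_bit_list (integer : Int) (out : List String) : Prop := out = transform_integer_into_bit_list_alt integer
instance (integer : Int) (out : List String) : Decidable (Spec_transform_integer_into_bit_list integer out) := by unfold Spec_transform_integer_into_bit_list; infer_instance

-- ===== CLAIM (what is proved, stated in full; the proofs are below) =====
def Claim_equal_transform_integer_into_bit_list : Prop := ∀ (integer : Int), Dom_transform_integer_into_bit_list integer → Spec_transform_integer_into_bit_list integer (transform_integer_into_bit_list integer)

-- ===== LEMMAS AND PROOFS =====

-- A's msb-first digits are B's lsb-first digits reversed (for n > 0).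
theorem pvDigits_eq (n : Nat) (h : 0 < n) : pvBinDigitsA n = (pvBitsLsbB n).reverse := by
  induction n using Nat.strong_induction_on with
  | _ n ih =>
    by_cases h2 : n < 2
    · have h1 : n = 1 := by omega
      subst h1
      rw [pvBinDigitsA, pvBitsLsbB, pvBitsLsbB]
      decide
    · rw [pvBinDigitsA, if_neg h2, pvBitsLsbB, if_neg (by omega : ¬ n = 0),
        List.reverse_cons, ih (n / 2) (by omega) (by omega), Nat.and_one_is_mod]

-- digits start with '1' (n > 0), hence digits are the same; for n = 0 both give ["0"]
theorem pvDigits_zero : pvBinDigitsA 0 = ["0"] := by rw [pvBinDigitsA]; decide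

-- A's prepend-fold over a range of length k is replicate k "0" ++ l.
theorem pvFold_insert (r : List Int) (l : List String) :
    List.foldl (fun acc _ => PySem.List.insert acc 0 "0") l r
      = List.replicate r.length "0" ++ l := by
  induction r generalizing l with
  | nil => simp
  | cons x r ih =>
    rw [List.foldl_cons, ih]
    have : PySem.List.insert l 0 "0" = "0" :: l := by
      simp [PySem.List.insert, PySem.List.sliceIndices]
    rw [this]
    simp [List.replicate_succ']

theorem pvRange_len (k : Nat) : (PySem.List.pyRange 0 (k : Int) 1).length = k := by
  simp [PySem.List.pyRange_of_pos]; omega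

-- ===== VERDICT (by name: the statement is the Claim_ definition above) =====
theorem transform_integer_into_bit_list_spec : Claim_equal_transform_integer_into_bit_list := by
  intro integer _
  simp only [Spec_transform_integer_into_bit_list, transform_integer_into_bit_list,
    transform_integer_into_bit_list_alt]
  set v : Int := if integer < 0 then PySem.Int.band integer 0xffff else integer with hv
  have hv0 : 0 ≤ v := by
    rw [hv]; split
    · rw [PySem.Int.band_comm]
      exact PySem.Int.band_nonneg_of_nonneg_left integer (by norm_num)
    · omega
  have hd : pvBinDigitsA v.toNat = if v = 0 then ["0"] else (pvBitsLsbB v.toNat).reverse := by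
    by_cases h0 : v = 0
    · simp [h0, pvDigits_zero]
    · rw [if_neg h0]
      exact pvDigits_eq v.toNat (by omega)
  rw [hd]
  set bits := if v = 0 then ["0"] else (pvBitsLsbB v.toNat).reverse with hbits
  by_cases hl : bits.length < 16
  · rw [if_pos hl]
    have h16 : ((16 : Int) - bits.length) = ((16 - bits.length : Nat) : Int) := by
      omega
    rw [h16, pvFold_insert, pvRange_len]
  · rw [if_neg hl]
    have : 16 - bits.length = 0 := by omega
    simp [this]
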